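-- pv_equiv track=rewrite | github.com/Devansh3712/reenactify | main.py | create_edge
-- ===== SOURCE A (Python) =====
-- def create_edge(head: str, tail: str, text: str):
--     # Add line breaks to text
--     text_list = text.split(" ")
--     for i in range(len(text_list)):
--         if i > 0 and i % 5 == 0:
--             text_list[i] = "<br>" + text_list[i]
--     text = " ".join(text_list)
--     return {
--         "arrows": "to",
--         "from": head,
--         "to": tail,
--         "title": text,
--     }
-- ===== SOURCE B (Python) =====
-- def create_edge(head: str, tail: str, text: str):
--     # Group the words into runs of five and rebuild the title by joining
--     # the runs with " <br>" (simpler: no index arithmetic, no list mutation).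
--     words = text.split(" ")
--     chunks = []
--     while words:
--         chunks.append(" ".join(words[:5]))
--         words = words[5:]
--     return {
--         "arrows": "to",
--         "from": head,
--         "to": tail,
--         "title": " <br>".join(chunks),
--     }
-- ===== Notes on version B (the rewrite author's own statement) =====
-- stated objective: simpler
-- what changed: B splits the text into words and rebuilds the title by joining five-word chunks with ' <br>' instead of A's indexed loop that conditionally mutates every fifth entry of the word list in place and rejoins with ' '.
import Mathlib
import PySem

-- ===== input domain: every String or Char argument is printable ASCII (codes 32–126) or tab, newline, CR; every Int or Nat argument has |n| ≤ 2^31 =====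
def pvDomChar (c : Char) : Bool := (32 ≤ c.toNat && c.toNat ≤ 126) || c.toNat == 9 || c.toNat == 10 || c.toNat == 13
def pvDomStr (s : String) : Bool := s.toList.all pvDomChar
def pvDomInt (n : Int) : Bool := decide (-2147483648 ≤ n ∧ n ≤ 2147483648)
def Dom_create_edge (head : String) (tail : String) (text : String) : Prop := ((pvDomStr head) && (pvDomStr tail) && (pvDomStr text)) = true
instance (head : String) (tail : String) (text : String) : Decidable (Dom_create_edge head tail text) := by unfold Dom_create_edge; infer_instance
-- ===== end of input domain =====

-- B rebuilds the title by joining five-word chunks with " <br>" instead of A's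
-- indexed loop that mutates the word list; same dict, simpler decomposition.

-- ===== PORT A =====
def create_edge (head : String) (tail : String) (text : String) : List (String × String) :=
  -- text.split(" "): the separator is nonempty, so split? is always `some` (exact)
  let text_list := (PySem.Str.split? text " ").getD []
  -- for i in range(len(text_list)): if i > 0 and i % 5 == 0: text_list[i] = "<br>" + text_list[i]
  -- i comes from range(len(text_list)), hence 0 ≤ i < len: List.set i.toNat / pyGetD are exact here
  let text_list := (PySem.List.pyRange 0 text_list.length).foldl
    (fun tl i => if 0 < i ∧ PySem.Int.mod i 5 = 0
      then tl.set i.toNat ("<br>" ++ PySem.List.pyGetD tl i "") else tl) text_list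
  let text := PySem.Str.join " " text_list
  [("arrows", "to"), ("from", head), ("to", tail), ("title", text)]

-- ===== PORT B =====
-- the while loop of Source B: peel five words at a time, joining each chunk with " "
def chunkJoins (ws : List String) : List String :=
  match ws with
  | [] => []
  | w :: rest => PySem.Str.join " " ((w :: rest).take 5) :: chunkJoins ((w :: rest).drop 5)
termination_by ws.length
decreasing_by simp

def create_edge_alt (head : String) (tail : String) (text : String) : List (String × String) :=
  let words := (PySem.Str.split? text " ").getD []   -- sep ≠ "", always `some` (exact)
  [("arrows", "to"), ("from", head), ("to", tail),
   ("title", PySem.Str.join " <br>" (chunkJoins words))]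

-- ===== PRECONDITION & SPEC =====
def Spec_create_edge (head : String) (tail : String) (text : String) (out : List (String × String)) : Prop := out = create_edge_alt head tail text
instance (head : String) (tail : String) (text : String) (out : List (String × String)) : Decidable (Spec_create_edge head tail text out) := by unfold Spec_create_edge; infer_instance

-- ===== CLAIM (what is proved, stated in full; the proofs are below) =====
def Claim_equal_create_edge : Prop := ∀ (head : String) (tail : String) (text : String), Dom_create_edge head tail text → Spec_create_edge head tail text (create_edge head tail text)

-- ===== LEMMAS AND PROOFS =====

-- A's loop, abstractly: mark word number k, k+1, … (prefix "<br>" where 0 < index ∧ index % 5 = 0)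
def markFrom (k : Nat) : List String → List String
  | [] => []
  | w :: ws => (if 0 < k ∧ k % 5 = 0 then "<br>" ++ w else w) :: markFrom (k + 1) ws

lemma set_append_length {α : Type} (a b : List α) (v : α) :
    (a ++ b).set a.length v = a ++ b.set 0 v := by
  induction a with
  | nil => simp
  | cons x xs ih => simp [ih]

-- A's foldl over range(len) equals markFrom, via the prefix-done invariant
lemma foldl_loop (todo done : List String) :
    (PySem.List.pyRange done.length (done.length + todo.length)).foldl
      (fun tl i => if 0 < i ∧ PySem.Int.mod i 5 = 0
        then tl.set i.toNat ("<br>" ++ PySem.List.pyGetD tl i "") else tl) (done ++ todo)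
    = done ++ markFrom done.length todo := by
  induction todo generalizing done with
  | nil => simp [markFrom, PySem.List.pyRange]
  | cons w ws ih =>
    have hlt : (done.length : Int) < done.length + (w :: ws).length := by
      simp only [List.length_cons]
      push_cast
      omega
    rw [PySem.List.pyRange_one_cons hlt, List.foldl_cons]
    have hget : PySem.List.pyGetD (done ++ w :: ws) (done.length : Int) "" = w := by
      rw [PySem.List.pyGetD_natCast, List.getD_eq_getElem?_getD,
        List.getElem?_append_right (le_refl _)]
      simp
    have hset : ∀ v : String, (done ++ w :: ws).set ((done.length : Int)).toNat v
        = (done ++ [v]) ++ ws := by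
      intro v
      rw [Int.toNat_natCast, set_append_length]
      simp
    have hcond : (0 < (done.length : Int) ∧ PySem.Int.mod (done.length : Int) 5 = 0)
        ↔ (0 < done.length ∧ done.length % 5 = 0) := by
      rw [PySem.Int.mod_eq_emod_of_pos (by norm_num)]
      omega
    have e1 : ∀ v : String, ((done.length : Int) + 1) = (((done ++ [v]).length : Nat) : Int) := by
      intro v; simp
    have e2 : ∀ v : String, ((done.length : Int) + (w :: ws).length)
        = (((done ++ [v]).length : Nat) : Int) + ws.length := by
      intro v
      simp only [List.length_append, List.length_cons, List.length_nil]
      push_cast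
      ring
    by_cases hc : 0 < done.length ∧ done.length % 5 = 0
    · rw [if_pos (hcond.mpr hc), hget, hset, e1 ("<br>" ++ w), e2 ("<br>" ++ w),
        ih (done ++ ["<br>" ++ w])]
      simp only [markFrom, List.length_append, List.length_cons, List.length_nil,
        if_pos hc, List.append_assoc, List.cons_append, List.nil_append,
        Nat.zero_add]
    · rw [if_neg (fun h => hc (hcond.mp h)),
        show done ++ w :: ws = (done ++ [w]) ++ ws from by simp,
        e1 w, e2 w, ih (done ++ [w])]
      simp only [markFrom, List.length_append, List.length_cons, List.length_nil,
        if_neg hc, List.append_assoc, List.cons_append, List.nil_append,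
        Nat.zero_add]

lemma foldl_eq_markFrom (ws : List String) :
    (PySem.List.pyRange 0 ws.length).foldl
      (fun tl i => if 0 < i ∧ PySem.Int.mod i 5 = 0
        then tl.set i.toNat ("<br>" ++ PySem.List.pyGetD tl i "") else tl) ws
    = markFrom 0 ws := by
  simpa using foldl_loop ws []

-- character level
def cmark (k : Nat) : List (List Char) → List (List Char)
  | [] => []
  | c :: cs => (if 0 < k ∧ k % 5 = 0 then '<' :: 'b' :: 'r' :: '>' :: c else c) :: cmark (k + 1) cs

def cchunks (css : List (List Char)) : List (List Char) :=
  match css with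
  | [] => []
  | c :: cs => PySem.Chars.join [' '] ((c :: cs).take 5) :: cchunks ((c :: cs).drop 5)
termination_by css.length
decreasing_by simp

lemma markFrom_toList (ws : List String) (k : Nat) :
    (markFrom k ws).map String.toList = cmark k (ws.map String.toList) := by
  induction ws generalizing k with
  | nil => rfl
  | cons w rest ih =>
    simp only [markFrom, cmark, List.map_cons, ih]
    congr 1
    split <;> simp [String.toList_append]

lemma chunkJoins_toList (ws : List String) :
    (chunkJoins ws).map String.toList = cchunks (ws.map String.toList) := by
  induction ws using chunkJoins.induct with
  | case1 => rw [chunkJoins, List.map_nil, cchunks.eq_def]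
  | case2 w rest ih =>
    rw [chunkJoins, List.map_cons, PySem.Str.toList_join,
      show (" ".toList) = [' '] from rfl, List.map_take, List.map_cons, ih,
      List.map_drop, List.map_cons]
    conv_rhs => rw [cchunks.eq_def]

lemma cjoin_append (sep : List Char) (a b : List (List Char)) (ha : a ≠ []) (hb : b ≠ []) :
    PySem.Chars.join sep (a ++ b) = PySem.Chars.join sep a ++ sep ++ PySem.Chars.join sep b := by
  induction a with
  | nil => simp at ha
  | cons x xs ih =>
    cases xs with
    | nil =>
      cases b with
      | nil => simp at hb
      | cons y ys => simp [PySem.Chars.join_cons_cons, PySem.Chars.join_singleton]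
    | cons x2 xs2 =>
      have ih' := ih (by simp)
      simp only [List.cons_append] at ih' ⊢
      rw [PySem.Chars.join_cons_cons, ih', PySem.Chars.join_cons_cons]
      simp [List.append_assoc]

lemma cmark_append (k : Nat) (a b : List (List Char)) :
    cmark k (a ++ b) = cmark k a ++ cmark (k + a.length) b := by
  induction a generalizing k with
  | nil => simp [cmark]
  | cons c cs ih => simp [cmark, ih (k + 1)]; ring_nf

lemma cmark_nomark (cs : List (List Char)) (k : Nat)
    (h : ∀ i < cs.length, ¬(0 < k + i ∧ (k + i) % 5 = 0)) : cmark k cs = cs := by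
  induction cs generalizing k with
  | nil => rfl
  | cons c rest ih =>
    have h0 := h 0 (by simp)
    simp only [cmark]
    rw [if_neg (by simpa using h0), ih (k + 1) (fun i hi => by
      have := h (i + 1) (by simp; omega); omega)]

lemma cmark_block0 (css : List (List Char)) (h : css.length ≤ 5) : cmark 0 css = css :=
  cmark_nomark css 0 (fun i hi => by omega)

lemma cmark_block (c : List Char) (cs : List (List Char)) (k : Nat)
    (h : cs.length ≤ 4) (hk : 0 < k) (h5 : k % 5 = 0) :
    cmark k (c :: cs) = ('<' :: 'b' :: 'r' :: '>' :: c) :: cs := by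
  simp only [cmark]
  rw [if_pos ⟨hk, h5⟩, cmark_nomark cs (k + 1) (fun i hi => by omega)]

lemma cjoin_br_cons (c : List Char) (cs : List (List Char)) :
    PySem.Chars.join [' '] (('<' :: 'b' :: 'r' :: '>' :: c) :: cs)
    = '<' :: 'b' :: 'r' :: '>' :: PySem.Chars.join [' '] (c :: cs) := by
  cases cs with
  | nil => simp [PySem.Chars.join_singleton]
  | cons d ds => simp [PySem.Chars.join_cons_cons]

lemma cmark_ne_nil (k : Nat) (css : List (List Char)) (h : css ≠ []) : cmark k css ≠ [] := by
  cases css with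
  | nil => simp at h
  | cons c cs => simp [cmark]

lemma cchunks_ne_nil (css : List (List Char)) (h : css ≠ []) : cchunks css ≠ [] := by
  cases css with
  | nil => simp at h
  | cons c cs => rw [cchunks.eq_def]; simp

lemma aux_marked (css : List (List Char)) :
    css ≠ [] → ∀ k : Nat, 0 < k → k % 5 = 0 →
    PySem.Chars.join [' '] (cmark k css)
      = '<' :: 'b' :: 'r' :: '>' :: PySem.Chars.join [' ', '<', 'b', 'r', '>'] (cchunks css) := by
  induction css using cchunks.induct with
  | case1 => intro h; exact absurd rfl h
  | case2 c cs ih =>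
    intro _ k hk h5
    by_cases hlen : cs.length ≤ 4
    · have hdrop : (c :: cs).drop 5 = [] := List.drop_eq_nil_iff.mpr (by simp; omega)
      have htake : (c :: cs).take 5 = c :: cs := List.take_of_length_le (by simp; omega)
      rw [cmark_block c cs k hlen hk h5, cjoin_br_cons, cchunks, htake, hdrop,
        show cchunks [] = [] from by rw [cchunks.eq_def], PySem.Chars.join_singleton]
    · have htake : (c :: cs).take 5 = c :: cs.take 4 := rfl
      have hdropne : (c :: cs).drop 5 ≠ [] := by
        simp only [List.drop_succ_cons]
        intro hnil
        have := List.drop_eq_nil_iff.mp hnil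
        omega
      have hsplit : c :: cs = (c :: cs).take 5 ++ (c :: cs).drop 5 :=
        (List.take_append_drop 5 (c :: cs)).symm
      have hmark : cmark k (c :: cs)
          = ('<' :: 'b' :: 'r' :: '>' :: c) :: cs.take 4 ++ cmark (k + 5) ((c :: cs).drop 5) := by
        conv_lhs => rw [hsplit]
        rw [cmark_append, htake,
          show (c :: cs.take 4).length = 5 from by simp [List.length_take]; omega,
          cmark_block c (cs.take 4) k (by simp [List.length_take]) hk h5]
      rw [hmark, cjoin_append [' '] _ _ (by simp) (cmark_ne_nil _ _ hdropne),
        ih hdropne (k + 5) (by omega) (by omega)]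
      obtain ⟨y, ys, hys⟩ : ∃ y ys, cchunks ((c :: cs).drop 5) = y :: ys := by
        cases hcc : cchunks ((c :: cs).drop 5) with
        | nil => exact absurd hcc (cchunks_ne_nil _ hdropne)
        | cons y ys => exact ⟨y, ys, rfl⟩
      rw [cchunks, hys, PySem.Chars.join_cons_cons, cjoin_br_cons, htake]
      simp [List.append_assoc]

lemma main_marked (css : List (List Char)) :
    PySem.Chars.join [' '] (cmark 0 css)
      = PySem.Chars.join [' ', '<', 'b', 'r', '>'] (cchunks css) := by
  cases css with
  | nil => rw [show cchunks [] = [] from by rw [cchunks.eq_def]]; rfl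
  | cons c cs =>
    by_cases hlen : cs.length ≤ 4
    · have hdrop : (c :: cs).drop 5 = [] := List.drop_eq_nil_iff.mpr (by simp; omega)
      have htake : (c :: cs).take 5 = c :: cs := List.take_of_length_le (by simp; omega)
      rw [cmark_block0 _ (by simp; omega), cchunks, htake, hdrop,
        show cchunks [] = [] from by rw [cchunks.eq_def], PySem.Chars.join_singleton]
    · have hdropne : (c :: cs).drop 5 ≠ [] := by
        simp only [List.drop_succ_cons]
        intro hnil
        have := List.drop_eq_nil_iff.mp hnil
        omega
      have hsplit : c :: cs = (c :: cs).take 5 ++ (c :: cs).drop 5 :=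
        (List.take_append_drop 5 (c :: cs)).symm
      have hmark : cmark 0 (c :: cs)
          = (c :: cs).take 5 ++ cmark 5 ((c :: cs).drop 5) := by
        conv_lhs => rw [hsplit]
        rw [cmark_append, cmark_block0 _ (by simp [List.length_take]),
          show (0 + ((c :: cs).take 5).length) = 5 from by
            simp [List.length_take]; omega]
      rw [hmark, cjoin_append [' '] _ _ (by simp) (cmark_ne_nil _ _ hdropne),
        aux_marked _ hdropne 5 (by omega) (by omega)]
      obtain ⟨y, ys, hys⟩ : ∃ y ys, cchunks ((c :: cs).drop 5) = y :: ys := by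
        cases hcc : cchunks ((c :: cs).drop 5) with
        | nil => exact absurd hcc (cchunks_ne_nil _ hdropne)
        | cons y ys => exact ⟨y, ys, rfl⟩
      rw [cchunks, hys, PySem.Chars.join_cons_cons]
      simp [List.append_assoc]

lemma title_eq (ws : List String) :
    PySem.Str.join " " (markFrom 0 ws) = PySem.Str.join " <br>" (chunkJoins ws) := by
  apply String.toList_inj.mp
  rw [PySem.Str.toList_join, PySem.Str.toList_join, markFrom_toList, chunkJoins_toList]
  exact main_marked (ws.map String.toList)

-- ===== VERDICT (by name: the statement is the Claim_ definition above) =====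
theorem create_edge_spec : Claim_equal_create_edge := by
  intro head tail text _
  unfold Spec_create_edge create_edge create_edge_alt
  simp only [foldl_eq_markFrom, title_eq]
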